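/-
  WHAT jsmn ACCEPTS THAT IS NOT JSON — A TABLE OF CONCRETE INPUTS, EACH WITH A CHECKED THEOREM      (generated by proofs/c6/tools/gen_table.py; do not edit by hand)

  For every input below: what `jsmn_init; jsmn_parse` returns, and the exact token array afterwards, in BOTH build configurations
  (`d_…`: the default build, `Config.default`; `s_…`: -DJSMN_STRICT -DJSMN_PARENT_LINKS, `Config.strictLinks`), in token mode and in counting mode.
  Every theorem is proved by `decide`: the Lean kernel runs the model `Jsmn.run` (Json/Jsmn/Model.lean: the model that the compiled program is proved to compute, Prog/Jsmn/Theorem.lean) on the input.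
  The inputs are those of kind "invalid" in the test corpus (proofs/c6/corpus.py, same names) and further ones for each kind of defect.

  HOW TO READ A LINE.   `Gives cfg text r [tokens] rc`:
      with an array of 8 tokens, all fields zero beforehand, jsmn_parse returns `r` and leaves `tokens` followed by untouched (all-zero) entries;
      in counting mode (tokens == NULL) it returns `rc`.
  A token is ⟨type, start, end, size, parent⟩; type 1 = object, 2 = array, 4 = string, 8 = primitive; `parent` is written only by the build with parent links (else it stays 0).
  Results: r ≥ 0 the number of tokens; -1 JSMN_ERROR_NOMEM, -2 JSMN_ERROR_INVAL, -3 JSMN_ERROR_PART. After an error the tokens written so far are shown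
  (an object or array with end = -1 is still open). An object's size counts its keys, a key's size its values, an array's size its elements.

  The table is grouped by KIND OF DEFECT (A – L); the last comment block of the file repeats it as one list: kind | input | default | strict.
-/
import Json.Jsmn.Model

namespace Jsmn.AcceptTable
open Jsmn

/-- The bytes of an ASCII text (every character of the tables is below 80H; inputs with other bytes are written as byte lists). -/
def ascii (s : String) : List UInt8 := s.toList.map fun c => UInt8.ofNat c.toNat

/-- `n` tokens with every field zero: the token array before the call. -/
def zeros (n : Nat) : Tokens := List.replicate n ⟨0, 0, 0, 0, 0⟩

/-- `Gives cfg text r tokens rc`: on `text`, with 8 zeroed tokens, `jsmn_init; jsmn_parse` returns `r` and the array is then `tokens` followed by untouched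
entries; with `tokens == NULL` (counting mode) it returns `rc`. -/
abbrev Gives (cfg : Config) (text : List UInt8) (r : Int) (tokens : Tokens) (rc : Int) : Prop :=
  run cfg text (some (zeros 8)) 8 = some (r, some (tokens ++ zeros (8 - tokens.length))) ∧ run cfg text none 0 = some (rc, none)

/-- The texts `ascii` is used on are what they look like: one byte per character. -/
theorem ascii_example : ascii "{a:1}" = [0x7b, 0x61, 0x3a, 0x31, 0x7d] := by decide

/-! ### A. NUMBERS AND LITERALS ARE NOT CHECKED

A "primitive" is any run of printable characters up to the next stop character (tab CR LF space , ] } and, not in strict mode, :) or the end of the text.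
jsmn never looks at what the run spells. Strict mode checks the FIRST character only (- 0-9 t f n) and wants a stop character after the run:
the same junk is accepted inside an array, or at top level when a space follows. -/

-- `txyz`
theorem d_txyz : Gives .default (ascii "txyz") 1 [⟨8,0,4,0,0⟩] 1 := by decide
theorem s_txyz : Gives .strictLinks (ascii "txyz") (-3) [] (-3) := by decide
-- `nul`
theorem d_nul_word : Gives .default (ascii "nul") 1 [⟨8,0,3,0,0⟩] 1 := by decide
theorem s_nul_word : Gives .strictLinks (ascii "nul") (-3) [] (-3) := by decide
-- `-`
theorem d_minus : Gives .default (ascii "-") 1 [⟨8,0,1,0,0⟩] 1 := by decide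
theorem s_minus : Gives .strictLinks (ascii "-") (-3) [] (-3) := by decide
-- `1e`
theorem d_one_e : Gives .default (ascii "1e") 1 [⟨8,0,2,0,0⟩] 1 := by decide
theorem s_one_e : Gives .strictLinks (ascii "1e") (-3) [] (-3) := by decide
-- `+1`
theorem d_plus_one : Gives .default (ascii "+1") 1 [⟨8,0,2,0,0⟩] 1 := by decide
theorem s_plus_one : Gives .strictLinks (ascii "+1") (-2) [] (-2) := by decide
-- `0123`
theorem d_lead_zero : Gives .default (ascii "0123") 1 [⟨8,0,4,0,0⟩] 1 := by decide
theorem s_lead_zero : Gives .strictLinks (ascii "0123") (-3) [] (-3) := by decide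
-- `.`
theorem d_dot : Gives .default (ascii ".") 1 [⟨8,0,1,0,0⟩] 1 := by decide
theorem s_dot : Gives .strictLinks (ascii ".") (-2) [] (-2) := by decide
-- `0x1F`
theorem d_hex : Gives .default (ascii "0x1F") 1 [⟨8,0,4,0,0⟩] 1 := by decide
theorem s_hex : Gives .strictLinks (ascii "0x1F") (-3) [] (-3) := by decide
-- `NaN`
theorem d_NaN : Gives .default (ascii "NaN") 1 [⟨8,0,3,0,0⟩] 1 := by decide
theorem s_NaN : Gives .strictLinks (ascii "NaN") (-2) [] (-2) := by decide
-- `-Infinity`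
theorem d_Infinity : Gives .default (ascii "-Infinity") 1 [⟨8,0,9,0,0⟩] 1 := by decide
theorem s_Infinity : Gives .strictLinks (ascii "-Infinity") (-3) [] (-3) := by decide
-- `TRUE`
theorem d_upper_true : Gives .default (ascii "TRUE") 1 [⟨8,0,4,0,0⟩] 1 := by decide
theorem s_upper_true : Gives .strictLinks (ascii "TRUE") (-2) [] (-2) := by decide
-- `[1] // c`   the "comment" is two primitives, `//` and `c`
theorem d_comment : Gives .default (ascii "[1] // c") 4 [⟨2,0,3,1,0⟩, ⟨8,1,2,0,0⟩, ⟨8,4,6,0,0⟩, ⟨8,7,8,0,0⟩] 4 := by decide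
theorem s_comment : Gives .strictLinks (ascii "[1] // c") (-2) [⟨2,0,3,1,-1⟩, ⟨8,1,2,0,0⟩] (-2) := by decide
-- `[txyz]`
theorem d_arr_txyz : Gives .default (ascii "[txyz]") 2 [⟨2,0,6,1,0⟩, ⟨8,1,5,0,0⟩] 2 := by decide
theorem s_arr_txyz : Gives .strictLinks (ascii "[txyz]") 2 [⟨2,0,6,1,-1⟩, ⟨8,1,5,0,0⟩] 2 := by decide
-- `[tru]`
theorem d_arr_tru : Gives .default (ascii "[tru]") 2 [⟨2,0,5,1,0⟩, ⟨8,1,4,0,0⟩] 2 := by decide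
theorem s_arr_tru : Gives .strictLinks (ascii "[tru]") 2 [⟨2,0,5,1,-1⟩, ⟨8,1,4,0,0⟩] 2 := by decide
-- `[nul]`
theorem d_arr_nul : Gives .default (ascii "[nul]") 2 [⟨2,0,5,1,0⟩, ⟨8,1,4,0,0⟩] 2 := by decide
theorem s_arr_nul : Gives .strictLinks (ascii "[nul]") 2 [⟨2,0,5,1,-1⟩, ⟨8,1,4,0,0⟩] 2 := by decide
-- `[-]`
theorem d_arr_minus : Gives .default (ascii "[-]") 2 [⟨2,0,3,1,0⟩, ⟨8,1,2,0,0⟩] 2 := by decide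
theorem s_arr_minus : Gives .strictLinks (ascii "[-]") 2 [⟨2,0,3,1,-1⟩, ⟨8,1,2,0,0⟩] 2 := by decide
-- `[1e]`
theorem d_arr_one_e : Gives .default (ascii "[1e]") 2 [⟨2,0,4,1,0⟩, ⟨8,1,3,0,0⟩] 2 := by decide
theorem s_arr_one_e : Gives .strictLinks (ascii "[1e]") 2 [⟨2,0,4,1,-1⟩, ⟨8,1,3,0,0⟩] 2 := by decide
-- `[0123]`
theorem d_arr_lead_zero : Gives .default (ascii "[0123]") 2 [⟨2,0,6,1,0⟩, ⟨8,1,5,0,0⟩] 2 := by decide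
theorem s_arr_lead_zero : Gives .strictLinks (ascii "[0123]") 2 [⟨2,0,6,1,-1⟩, ⟨8,1,5,0,0⟩] 2 := by decide
-- `[0x1F]`
theorem d_arr_hex : Gives .default (ascii "[0x1F]") 2 [⟨2,0,6,1,0⟩, ⟨8,1,5,0,0⟩] 2 := by decide
theorem s_arr_hex : Gives .strictLinks (ascii "[0x1F]") 2 [⟨2,0,6,1,-1⟩, ⟨8,1,5,0,0⟩] 2 := by decide
-- `[-Infinity]`
theorem d_arr_Infinity : Gives .default (ascii "[-Infinity]") 2 [⟨2,0,11,1,0⟩, ⟨8,1,10,0,0⟩] 2 := by decide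
theorem s_arr_Infinity : Gives .strictLinks (ascii "[-Infinity]") 2 [⟨2,0,11,1,-1⟩, ⟨8,1,10,0,0⟩] 2 := by decide
-- `[NaN]`
theorem d_arr_NaN : Gives .default (ascii "[NaN]") 2 [⟨2,0,5,1,0⟩, ⟨8,1,4,0,0⟩] 2 := by decide
theorem s_arr_NaN : Gives .strictLinks (ascii "[NaN]") (-2) [⟨2,0,-1,0,-1⟩] (-2) := by decide
-- `txyz<20>`   strict accepts it at top level too, once a stop character follows
theorem d_txyz_space : Gives .default (ascii "txyz ") 1 [⟨8,0,4,0,0⟩] 1 := by decide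
theorem s_txyz_space : Gives .strictLinks (ascii "txyz ") 1 [⟨8,0,4,0,-1⟩] 1 := by decide
-- `{"a":tru}`
theorem d_obj_val_tru : Gives .default (ascii r#"{"a":tru}"#) 3 [⟨1,0,9,1,0⟩, ⟨4,2,3,1,0⟩, ⟨8,5,8,0,0⟩] 3 := by decide
theorem s_obj_val_tru : Gives .strictLinks (ascii r#"{"a":tru}"#) 3 [⟨1,0,9,1,-1⟩, ⟨4,2,3,1,0⟩, ⟨8,5,8,0,1⟩] 3 := by decide

/-! ### B. A PRIMITIVE SWALLOWS QUOTES AND OPENING BRACKETS (AND, IN STRICT MODE, COLONS)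

Inside a primitive only the stop characters and the bytes outside 20H - 7EH are looked at: `"` `{` `[` are ordinary characters there, and so is `:` in strict mode. -/

-- `1"a"`   one primitive of four characters
theorem d_prim_adjacent_str : Gives .default (ascii r#"1"a""#) 1 [⟨8,0,4,0,0⟩] 1 := by decide
theorem s_prim_adjacent_str : Gives .strictLinks (ascii r#"1"a""#) (-3) [] (-3) := by decide
-- `a{`
theorem d_prim_brace : Gives .default (ascii "a{") 1 [⟨8,0,2,0,0⟩] 1 := by decide
theorem s_prim_brace : Gives .strictLinks (ascii "a{") (-2) [] (-2) := by decide
-- `[a[b]`   the primitive is `a[b`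
theorem d_arr_prim_bracket : Gives .default (ascii "[a[b]") 2 [⟨2,0,5,1,0⟩, ⟨8,1,4,0,0⟩] 2 := by decide
theorem s_arr_prim_bracket : Gives .strictLinks (ascii "[a[b]") (-2) [⟨2,0,-1,0,-1⟩] (-2) := by decide
-- `[1"a"]`
theorem d_arr_prim_quote : Gives .default (ascii r#"[1"a"]"#) 2 [⟨2,0,6,1,0⟩, ⟨8,1,5,0,0⟩] 2 := by decide
theorem s_arr_prim_quote : Gives .strictLinks (ascii r#"[1"a"]"#) 2 [⟨2,0,6,1,-1⟩, ⟨8,1,5,0,0⟩] 2 := by decide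
-- `[1{]`
theorem d_arr_prim_brace : Gives .default (ascii "[1{]") 2 [⟨2,0,4,1,0⟩, ⟨8,1,3,0,0⟩] 2 := by decide
theorem s_arr_prim_brace : Gives .strictLinks (ascii "[1{]") 2 [⟨2,0,4,1,-1⟩, ⟨8,1,3,0,0⟩] 2 := by decide
-- `[1:2]`   default: two primitives, and `2` is counted as a child of `1`; strict: ONE primitive `1:2`
theorem d_colon_in_arr : Gives .default (ascii "[1:2]") 3 [⟨2,0,5,1,0⟩, ⟨8,1,2,1,0⟩, ⟨8,3,4,0,0⟩] 3 := by decide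
theorem s_colon_in_arr : Gives .strictLinks (ascii "[1:2]") 2 [⟨2,0,5,1,-1⟩, ⟨8,1,4,0,0⟩] 2 := by decide
-- `{"a":1:2}`   strict: the value is the primitive `1:2`
theorem d_obj_colon_in_val : Gives .default (ascii r#"{"a":1:2}"#) 4 [⟨1,0,9,1,0⟩, ⟨4,2,3,1,0⟩, ⟨8,5,6,1,0⟩, ⟨8,7,8,0,0⟩] 4 := by decide
theorem s_obj_colon_in_val : Gives .strictLinks (ascii r#"{"a":1:2}"#) 3 [⟨1,0,9,1,-1⟩, ⟨4,2,3,1,0⟩, ⟨8,5,8,0,1⟩] 3 := by decide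
-- `"a"1`   a string, then a primitive
theorem d_str_adjacent_prim : Gives .default (ascii r#""a"1"#) 2 [⟨4,1,2,0,0⟩, ⟨8,3,4,0,0⟩] 2 := by decide
theorem s_str_adjacent_prim : Gives .strictLinks (ascii r#""a"1"#) (-3) [⟨4,1,2,0,-1⟩] (-3) := by decide

/-! ### C. KEYS NEED NOT BE STRINGS, VALUES NEED NOT BE JSON VALUES (default configuration)

In the default configuration anything may stand where a key or a value is expected. Strict mode rejects a primitive or a container directly inside an object. -/

-- `{a:1}`
theorem d_unquoted_key : Gives .default (ascii "{a:1}") 3 [⟨1,0,5,1,0⟩, ⟨8,1,2,1,0⟩, ⟨8,3,4,0,0⟩] 3 := by decide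
theorem s_unquoted_key : Gives .strictLinks (ascii "{a:1}") (-2) [⟨1,0,-1,0,-1⟩] (-2) := by decide
-- `{"a":b}`
theorem d_unquoted_val : Gives .default (ascii r#"{"a":b}"#) 3 [⟨1,0,7,1,0⟩, ⟨4,2,3,1,0⟩, ⟨8,5,6,0,0⟩] 3 := by decide
theorem s_unquoted_val : Gives .strictLinks (ascii r#"{"a":b}"#) (-2) [⟨1,0,-1,1,-1⟩, ⟨4,2,3,0,0⟩] (-2) := by decide
-- `{1:2}`
theorem d_obj_key_num : Gives .default (ascii "{1:2}") 3 [⟨1,0,5,1,0⟩, ⟨8,1,2,1,0⟩, ⟨8,3,4,0,0⟩] 3 := by decide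
theorem s_obj_key_num : Gives .strictLinks (ascii "{1:2}") (-2) [⟨1,0,-1,0,-1⟩] 2 := by decide
-- `{[1]:2}`
theorem d_obj_key_arr : Gives .default (ascii "{[1]:2}") 4 [⟨1,0,7,1,0⟩, ⟨2,1,4,1,0⟩, ⟨8,2,3,1,0⟩, ⟨8,5,6,0,0⟩] 4 := by decide
theorem s_obj_key_arr : Gives .strictLinks (ascii "{[1]:2}") (-2) [⟨1,0,-1,0,-1⟩, ⟨0,-1,-1,0,-1⟩] 4 := by decide
-- `{{}:1}`
theorem d_obj_key_obj : Gives .default (ascii "{{}:1}") 3 [⟨1,0,6,1,0⟩, ⟨1,1,3,1,0⟩, ⟨8,4,5,0,0⟩] 3 := by decide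
theorem s_obj_key_obj : Gives .strictLinks (ascii "{{}:1}") (-2) [⟨1,0,-1,0,-1⟩, ⟨0,-1,-1,0,-1⟩] 3 := by decide
-- `{'a':1}`   the key is the primitive `'a'`
theorem d_single_quote : Gives .default (ascii "{'a':1}") 3 [⟨1,0,7,1,0⟩, ⟨8,1,4,1,0⟩, ⟨8,5,6,0,0⟩] 3 := by decide
theorem s_single_quote : Gives .strictLinks (ascii "{'a':1}") (-2) [⟨1,0,-1,0,-1⟩] (-2) := by decide
-- `{:1}`
theorem d_obj_colon_first : Gives .default (ascii "{:1}") 2 [⟨1,0,4,1,0⟩, ⟨8,2,3,0,0⟩] 2 := by decide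
theorem s_obj_colon_first : Gives .strictLinks (ascii "{:1}") (-2) [⟨1,0,-1,0,-1⟩] 2 := by decide

/-! ### D. COMMAS ARE NOT REQUIRED AND NOT CHECKED

A comma only moves `toksuper` from a key back to its object; nothing requires one between elements, and nothing forbids one anywhere. -/

-- `[1 2]`
theorem d_missing_comma_arr : Gives .default (ascii "[1 2]") 3 [⟨2,0,5,2,0⟩, ⟨8,1,2,0,0⟩, ⟨8,3,4,0,0⟩] 3 := by decide
theorem s_missing_comma_arr : Gives .strictLinks (ascii "[1 2]") 3 [⟨2,0,5,2,-1⟩, ⟨8,1,2,0,0⟩, ⟨8,3,4,0,0⟩] 3 := by decide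
-- `{"a":1 "b":2}`   the key "a" gets size 2: `"b"` is counted as a second value of "a"
theorem d_missing_comma_obj : Gives .default (ascii r#"{"a":1 "b":2}"#) 5 [⟨1,0,13,1,0⟩, ⟨4,2,3,2,0⟩, ⟨8,5,6,0,0⟩, ⟨4,8,9,1,0⟩, ⟨8,11,12,0,0⟩] 5 := by decide
theorem s_missing_comma_obj : Gives .strictLinks (ascii r#"{"a":1 "b":2}"#) 5 [⟨1,0,13,1,-1⟩, ⟨4,2,3,2,0⟩, ⟨8,5,6,0,1⟩, ⟨4,8,9,1,1⟩, ⟨8,11,12,0,3⟩] 5 := by decide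
-- `{"a":[1] "b":2}`   the two configurations give DIFFERENT sizes: default object 2, key "a" 1; strict/links object 1, key "a" 2
theorem d_missing_comma_nested : Gives .default (ascii r#"{"a":[1] "b":2}"#) 6 [⟨1,0,15,2,0⟩, ⟨4,2,3,1,0⟩, ⟨2,5,8,1,0⟩, ⟨8,6,7,0,0⟩, ⟨4,10,11,1,0⟩, ⟨8,13,14,0,0⟩] 6 := by decide
theorem s_missing_comma_nested : Gives .strictLinks (ascii r#"{"a":[1] "b":2}"#) 6 [⟨1,0,15,1,-1⟩, ⟨4,2,3,2,0⟩, ⟨2,5,8,1,1⟩, ⟨8,6,7,0,2⟩, ⟨4,10,11,1,1⟩, ⟨8,13,14,0,4⟩] 6 := by decide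
-- `[1,2,]`
theorem d_trailing_comma_arr : Gives .default (ascii "[1,2,]") 3 [⟨2,0,6,2,0⟩, ⟨8,1,2,0,0⟩, ⟨8,3,4,0,0⟩] 3 := by decide
theorem s_trailing_comma_arr : Gives .strictLinks (ascii "[1,2,]") 3 [⟨2,0,6,2,-1⟩, ⟨8,1,2,0,0⟩, ⟨8,3,4,0,0⟩] 3 := by decide
-- `{"a":1,}`
theorem d_trailing_comma_obj : Gives .default (ascii r#"{"a":1,}"#) 3 [⟨1,0,8,1,0⟩, ⟨4,2,3,1,0⟩, ⟨8,5,6,0,0⟩] 3 := by decide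
theorem s_trailing_comma_obj : Gives .strictLinks (ascii r#"{"a":1,}"#) 3 [⟨1,0,8,1,-1⟩, ⟨4,2,3,1,0⟩, ⟨8,5,6,0,1⟩] 3 := by decide
-- `[,1]`
theorem d_leading_comma : Gives .default (ascii "[,1]") 2 [⟨2,0,4,1,0⟩, ⟨8,2,3,0,0⟩] 2 := by decide
theorem s_leading_comma : Gives .strictLinks (ascii "[,1]") 2 [⟨2,0,4,1,-1⟩, ⟨8,2,3,0,0⟩] 2 := by decide
-- `[1,,2]`
theorem d_double_comma : Gives .default (ascii "[1,,2]") 3 [⟨2,0,6,2,0⟩, ⟨8,1,2,0,0⟩, ⟨8,4,5,0,0⟩] 3 := by decide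
theorem s_double_comma : Gives .strictLinks (ascii "[1,,2]") 3 [⟨2,0,6,2,-1⟩, ⟨8,1,2,0,0⟩, ⟨8,4,5,0,0⟩] 3 := by decide
-- `,`
theorem d_bare_comma : Gives .default (ascii ",") 0 [] 0 := by decide
theorem s_bare_comma : Gives .strictLinks (ascii ",") 0 [] 0 := by decide
-- `{"a","b"}`   an object of two keys and no value
theorem d_obj_comma_keys : Gives .default (ascii r#"{"a","b"}"#) 3 [⟨1,0,9,2,0⟩, ⟨4,2,3,0,0⟩, ⟨4,6,7,0,0⟩] 3 := by decide
theorem s_obj_comma_keys : Gives .strictLinks (ascii r#"{"a","b"}"#) 3 [⟨1,0,9,2,-1⟩, ⟨4,2,3,0,0⟩, ⟨4,6,7,0,0⟩] 3 := by decide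
-- `{"a":1 2}`   default: key "a" with two values; strict: -2 (a primitive after a key that has a value)
theorem d_key_then_two : Gives .default (ascii r#"{"a":1 2}"#) 4 [⟨1,0,9,1,0⟩, ⟨4,2,3,2,0⟩, ⟨8,5,6,0,0⟩, ⟨8,7,8,0,0⟩] 4 := by decide
theorem s_key_then_two : Gives .strictLinks (ascii r#"{"a":1 2}"#) (-2) [⟨1,0,-1,1,-1⟩, ⟨4,2,3,1,0⟩, ⟨8,5,6,0,1⟩] 4 := by decide
-- `{"a":"b" "c"}`   both configurations: key "a" with two values
theorem d_key_two_strings : Gives .default (ascii r#"{"a":"b" "c"}"#) 4 [⟨1,0,13,1,0⟩, ⟨4,2,3,2,0⟩, ⟨4,6,7,0,0⟩, ⟨4,10,11,0,0⟩] 4 := by decide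
theorem s_key_two_strings : Gives .strictLinks (ascii r#"{"a":"b" "c"}"#) 4 [⟨1,0,13,1,-1⟩, ⟨4,2,3,2,0⟩, ⟨4,6,7,0,1⟩, ⟨4,10,11,0,1⟩] 4 := by decide

/-! ### E. COLONS ARE NOT REQUIRED AND NOT CHECKED

A colon only makes the LAST token (whatever it is, open or closed) the superior of what follows; nothing requires one after a key, and nothing forbids one anywhere. -/

-- `:`
theorem d_bare_colon : Gives .default (ascii ":") 0 [] 0 := by decide
theorem s_bare_colon : Gives .strictLinks (ascii ":") 0 [] 0 := by decide
-- `{"a" "b"}`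
theorem d_obj_two_strings : Gives .default (ascii r#"{"a" "b"}"#) 3 [⟨1,0,9,2,0⟩, ⟨4,2,3,0,0⟩, ⟨4,6,7,0,0⟩] 3 := by decide
theorem s_obj_two_strings : Gives .strictLinks (ascii r#"{"a" "b"}"#) 3 [⟨1,0,9,2,-1⟩, ⟨4,2,3,0,0⟩, ⟨4,6,7,0,0⟩] 3 := by decide
-- `{"a"}`
theorem d_obj_no_value : Gives .default (ascii r#"{"a"}"#) 2 [⟨1,0,5,1,0⟩, ⟨4,2,3,0,0⟩] 2 := by decide
theorem s_obj_no_value : Gives .strictLinks (ascii r#"{"a"}"#) 2 [⟨1,0,5,1,-1⟩, ⟨4,2,3,0,0⟩] 2 := by decide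
-- `{"a":}`
theorem d_obj_no_value2 : Gives .default (ascii r#"{"a":}"#) 2 [⟨1,0,6,1,0⟩, ⟨4,2,3,0,0⟩] 2 := by decide
theorem s_obj_no_value2 : Gives .strictLinks (ascii r#"{"a":}"#) 2 [⟨1,0,6,1,-1⟩, ⟨4,2,3,0,0⟩] 2 := by decide
-- `{"a"::1}`
theorem d_colon_colon : Gives .default (ascii r#"{"a"::1}"#) 3 [⟨1,0,8,1,0⟩, ⟨4,2,3,1,0⟩, ⟨8,6,7,0,0⟩] 3 := by decide
theorem s_colon_colon : Gives .strictLinks (ascii r#"{"a"::1}"#) 3 [⟨1,0,8,1,-1⟩, ⟨4,2,3,1,0⟩, ⟨8,6,7,0,1⟩] 3 := by decide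
-- `["a":1]`   an array with a key
theorem d_arr_colon_key : Gives .default (ascii r#"["a":1]"#) 3 [⟨2,0,7,1,0⟩, ⟨4,2,3,1,0⟩, ⟨8,5,6,0,0⟩] 3 := by decide
theorem s_arr_colon_key : Gives .strictLinks (ascii r#"["a":1]"#) 3 [⟨2,0,7,1,-1⟩, ⟨4,2,3,1,0⟩, ⟨8,5,6,0,1⟩] 3 := by decide
-- `[:1]`
theorem d_arr_colon_first : Gives .default (ascii "[:1]") 2 [⟨2,0,4,1,0⟩, ⟨8,2,3,0,0⟩] 2 := by decide
theorem s_arr_colon_first : Gives .strictLinks (ascii "[:1]") 2 [⟨2,0,4,1,-1⟩, ⟨8,2,3,0,0⟩] 2 := by decide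
-- `1:2`
theorem d_value_then_colon : Gives .default (ascii "1:2") 2 [⟨8,0,1,1,0⟩, ⟨8,2,3,0,0⟩] 2 := by decide
theorem s_value_then_colon : Gives .strictLinks (ascii "1:2") (-3) [] (-3) := by decide
-- `"a":"b"`   a key and its value without an object
theorem d_str_colon_str_top : Gives .default (ascii r#""a":"b""#) 2 [⟨4,1,2,1,0⟩, ⟨4,5,6,0,0⟩] 2 := by decide
theorem s_str_colon_str_top : Gives .strictLinks (ascii r#""a":"b""#) 2 [⟨4,1,2,1,-1⟩, ⟨4,5,6,0,0⟩] 2 := by decide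
-- `[1,2]:3<20>`   the primitive `2` of the CLOSED array becomes the parent of `3`
theorem d_colon_after_arr : Gives .default (ascii "[1,2]:3 ") 4 [⟨2,0,5,2,0⟩, ⟨8,1,2,0,0⟩, ⟨8,3,4,1,0⟩, ⟨8,6,7,0,0⟩] 4 := by decide
theorem s_colon_after_arr : Gives .strictLinks (ascii "[1,2]:3 ") 4 [⟨2,0,5,2,-1⟩, ⟨8,1,2,0,0⟩, ⟨8,3,4,1,0⟩, ⟨8,6,7,0,2⟩] 4 := by decide

/-! ### F. ANY NUMBER OF VALUES AT TOP LEVEL, ALSO NONE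

RFC 8259: a JSON text is ONE value. jsmn returns the number of tokens of as many values as there are; the empty text gives 0, not an error. -/

-- ``
theorem d_empty : Gives .default (ascii "") 0 [] 0 := by decide
theorem s_empty : Gives .strictLinks (ascii "") 0 [] 0 := by decide
-- `  <0A>`
theorem d_only_ws : Gives .default (ascii "  \n") 0 [] 0 := by decide
theorem s_only_ws : Gives .strictLinks (ascii "  \n") 0 [] 0 := by decide
-- `1 2`   strict: -3 because the last primitive ends at the end of the text (see H)
theorem d_two_values : Gives .default (ascii "1 2") 2 [⟨8,0,1,0,0⟩, ⟨8,2,3,0,0⟩] 2 := by decide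
theorem s_two_values : Gives .strictLinks (ascii "1 2") (-3) [⟨8,0,1,0,-1⟩] (-3) := by decide
-- `{}{}`
theorem d_two_objs : Gives .default (ascii "{}{}") 2 [⟨1,0,2,0,0⟩, ⟨1,2,4,0,0⟩] 2 := by decide
theorem s_two_objs : Gives .strictLinks (ascii "{}{}") 2 [⟨1,0,2,0,-1⟩, ⟨1,2,4,0,-1⟩] 2 := by decide
-- `"a" "b"`
theorem d_two_strings : Gives .default (ascii r#""a" "b""#) 2 [⟨4,1,2,0,0⟩, ⟨4,5,6,0,0⟩] 2 := by decide
theorem s_two_strings : Gives .strictLinks (ascii r#""a" "b""#) 2 [⟨4,1,2,0,-1⟩, ⟨4,5,6,0,-1⟩] 2 := by decide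
-- `[] 1<20>`
theorem d_arr_then_prim : Gives .default (ascii "[] 1 ") 2 [⟨2,0,2,0,0⟩, ⟨8,3,4,0,0⟩] 2 := by decide
theorem s_arr_then_prim : Gives .strictLinks (ascii "[] 1 ") 2 [⟨2,0,2,0,-1⟩, ⟨8,3,4,0,-1⟩] 2 := by decide

/-! ### G. A NUL BYTE ENDS THE TEXT

The loops stop at a NUL byte even when `len` says the text goes on: what follows is never looked at. -/

-- `<00>[1]`   nothing is parsed
theorem d_nul_first : Gives .default (ascii "\x00[1]") 0 [] 0 := by decide
theorem s_nul_first : Gives .strictLinks (ascii "\x00[1]") 0 [] 0 := by decide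
-- `[1]<00>]]]`
theorem d_nul_then_junk : Gives .default (ascii "[1]\x00]]]") 2 [⟨2,0,3,1,0⟩, ⟨8,1,2,0,0⟩] 2 := by decide
theorem s_nul_then_junk : Gives .strictLinks (ascii "[1]\x00]]]") 2 [⟨2,0,3,1,-1⟩, ⟨8,1,2,0,0⟩] 2 := by decide
-- `[1,<00>2]`   token mode: -3 (the array is open); counting mode: 2
theorem d_nul_mid : Gives .default (ascii "[1,\x002]") (-3) [⟨2,0,-1,1,0⟩, ⟨8,1,2,0,0⟩] 2 := by decide
theorem s_nul_mid : Gives .strictLinks (ascii "[1,\x002]") (-3) [⟨2,0,-1,1,-1⟩, ⟨8,1,2,0,0⟩] 2 := by decide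

/-! ### H. STRICT MODE REJECTS VALID JSON: A PRIMITIVE AT THE END OF THE TEXT

In strict mode a primitive must be followed by a stop character; at the end of the text jsmn answers JSMN_ERROR_PART (-3).
So the RFC 8259 texts `42`, `true`, `null` are rejected by the strict build, and accepted again with a space or a newline appended. -/

-- `42`   VALID JSON
theorem d_rfc_42 : Gives .default (ascii "42") 1 [⟨8,0,2,0,0⟩] 1 := by decide
theorem s_rfc_42 : Gives .strictLinks (ascii "42") (-3) [] (-3) := by decide
-- `true`   VALID JSON
theorem d_rfc_true : Gives .default (ascii "true") 1 [⟨8,0,4,0,0⟩] 1 := by decide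
theorem s_rfc_true : Gives .strictLinks (ascii "true") (-3) [] (-3) := by decide
-- `null`   VALID JSON
theorem d_null : Gives .default (ascii "null") 1 [⟨8,0,4,0,0⟩] 1 := by decide
theorem s_null : Gives .strictLinks (ascii "null") (-3) [] (-3) := by decide
-- `-1.5E-10`   VALID JSON
theorem d_num_exp2 : Gives .default (ascii "-1.5E-10") 1 [⟨8,0,8,0,0⟩] 1 := by decide
theorem s_num_exp2 : Gives .strictLinks (ascii "-1.5E-10") (-3) [] (-3) := by decide
-- `42<20>`   VALID JSON
theorem d_rfc_42_space : Gives .default (ascii "42 ") 1 [⟨8,0,2,0,0⟩] 1 := by decide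
theorem s_rfc_42_space : Gives .strictLinks (ascii "42 ") 1 [⟨8,0,2,0,-1⟩] 1 := by decide
-- `true<0A>`   VALID JSON
theorem d_true_newline : Gives .default (ascii "true\n") 1 [⟨8,0,4,0,0⟩] 1 := by decide
theorem s_true_newline : Gives .strictLinks (ascii "true\n") 1 [⟨8,0,4,0,-1⟩] 1 := by decide

/-! ### I. STRINGS: CONTROL CHARACTERS AND ILL-FORMED UTF-8 ARE ACCEPTED

Inside a string only `"` and `\` are looked at (and a NUL, which ends the text). RFC 8259 forbids the bytes 00H - 1FH there and requires UTF-8.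
A `\u` escape wants four hex digits, but at the end of the text fewer are let through; the string is then unterminated (-3), so this never leads to acceptance. -/

-- `"a<01>b"`
theorem d_ctrl_in_str : Gives .default (ascii "\"a\x01b\"") 1 [⟨4,1,4,0,0⟩] 1 := by decide
theorem s_ctrl_in_str : Gives .strictLinks (ascii "\"a\x01b\"") 1 [⟨4,1,4,0,-1⟩] 1 := by decide
-- `"a<09>b"`
theorem d_tab_in_str : Gives .default (ascii "\"a\tb\"") 1 [⟨4,1,4,0,0⟩] 1 := by decide
theorem s_tab_in_str : Gives .strictLinks (ascii "\"a\tb\"") 1 [⟨4,1,4,0,-1⟩] 1 := by decide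
-- `"a<0A>b"`
theorem d_nl_in_str : Gives .default (ascii "\"a\nb\"") 1 [⟨4,1,4,0,0⟩] 1 := by decide
theorem s_nl_in_str : Gives .strictLinks (ascii "\"a\nb\"") 1 [⟨4,1,4,0,-1⟩] 1 := by decide
-- `"a<7F>b"`   DEL is allowed by RFC 8259; listed for contrast with primitives, where it is -2
theorem d_del_in_str : Gives .default (ascii "\"a\x7fb\"") 1 [⟨4,1,4,0,0⟩] 1 := by decide
theorem s_del_in_str : Gives .strictLinks (ascii "\"a\x7fb\"") 1 [⟨4,1,4,0,-1⟩] 1 := by decide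
-- `"<FF><FE>"`   not UTF-8
theorem d_bad_utf8_in_str : Gives .default ([0x22, 0xff, 0xfe, 0x22]) 1 [⟨4,1,3,0,0⟩] 1 := by decide
theorem s_bad_utf8_in_str : Gives .strictLinks ([0x22, 0xff, 0xfe, 0x22]) 1 [⟨4,1,3,0,-1⟩] 1 := by decide
-- `"\ud800"`   allowed by the grammar of RFC 8259 (section 8.2 warns)
theorem d_lone_surrogate : Gives .default (ascii "\"\\ud800\"") 1 [⟨4,1,7,0,0⟩] 1 := by decide
theorem s_lone_surrogate : Gives .strictLinks (ascii "\"\\ud800\"") 1 [⟨4,1,7,0,-1⟩] 1 := by decide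
-- `"\x"`   rejected
theorem d_bad_escape : Gives .default (ascii "\"\\x\"") (-2) [] (-2) := by decide
theorem s_bad_escape : Gives .strictLinks (ascii "\"\\x\"") (-2) [] (-2) := by decide
-- `"\u12G4"`   rejected
theorem d_bad_u : Gives .default (ascii "\"\\u12G4\"") (-2) [] (-2) := by decide
theorem s_bad_u : Gives .strictLinks (ascii "\"\\u12G4\"") (-2) [] (-2) := by decide
-- `"\u12"`   rejected: `"` is not a hex digit
theorem d_short_u : Gives .default (ascii "\"\\u12\"") (-2) [] (-2) := by decide
theorem s_short_u : Gives .strictLinks (ascii "\"\\u12\"") (-2) [] (-2) := by decide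
-- `"\u00`   -3, not -2: the escape is cut by the end of the text
theorem d_u_partial_end : Gives .default (ascii "\"\\u00") (-3) [] (-3) := by decide
theorem s_u_partial_end : Gives .strictLinks (ascii "\"\\u00") (-3) [] (-3) := by decide
-- `"\u`
theorem d_u_at_end : Gives .default (ascii "\"\\u") (-3) [] (-3) := by decide
theorem s_u_at_end : Gives .strictLinks (ascii "\"\\u") (-3) [] (-3) := by decide
-- `"abc\`   a backslash as the LAST byte of the buffer is skipped like any byte: -3
theorem d_backslash_end : Gives .default (ascii "\"abc\\") (-3) [] (-3) := by decide
theorem s_backslash_end : Gives .strictLinks (ascii "\"abc\\") (-3) [] (-3) := by decide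
-- `"a\<00>"`   a backslash before a NUL inside the buffer: -2
theorem d_backslash_nul : Gives .default (ascii "\"a\\\x00\"") (-2) [] (-2) := by decide
theorem s_backslash_nul : Gives .strictLinks (ascii "\"a\\\x00\"") (-2) [] (-2) := by decide
-- `"a<00>b"`   -3: the NUL ends the text inside the string
theorem d_nul_in_str : Gives .default (ascii "\"a\x00b\"") (-3) [] (-3) := by decide
theorem s_nul_in_str : Gives .strictLinks (ascii "\"a\x00b\"") (-3) [] (-3) := by decide

/-! ### J. WITH PARENT LINKS: AN UNMATCHED CLOSING BRACKET IS ACCEPTED AFTER A COLON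

With JSMN_PARENT_LINKS a closing bracket walks up the parent links from the last token. When it reaches a CLOSED top-level token of its own kind it is an error only if
`toksuper == -1`; a colon has just set `toksuper` to the last token, so the stray bracket is silently accepted. The default build (backward scan) answers -2. -/

-- `{}:}`
theorem d_links_extra_brace : Gives .default (ascii "{}:}") (-2) [⟨1,0,2,0,0⟩] 1 := by decide
theorem s_links_extra_brace : Gives .strictLinks (ascii "{}:}") 1 [⟨1,0,2,0,-1⟩] 1 := by decide
-- `[]:]`
theorem d_links_extra_bracket : Gives .default (ascii "[]:]") (-2) [⟨2,0,2,0,0⟩] 1 := by decide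
theorem s_links_extra_bracket : Gives .strictLinks (ascii "[]:]") 1 [⟨2,0,2,0,-1⟩] 1 := by decide
-- `{"a":1}:}`
theorem d_links_extra_brace2 : Gives .default (ascii r#"{"a":1}:}"#) (-2) [⟨1,0,7,1,0⟩, ⟨4,2,3,1,0⟩, ⟨8,5,6,0,0⟩] 3 := by decide
theorem s_links_extra_brace2 : Gives .strictLinks (ascii r#"{"a":1}:}"#) 3 [⟨1,0,7,1,-1⟩, ⟨4,2,3,1,0⟩, ⟨8,5,6,0,1⟩] 3 := by decide
-- `[1]:]:]`
theorem d_links_extra_twice : Gives .default (ascii "[1]:]:]") (-2) [⟨2,0,3,1,0⟩, ⟨8,1,2,0,0⟩] 2 := by decide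
theorem s_links_extra_twice : Gives .strictLinks (ascii "[1]:]:]") 2 [⟨2,0,3,1,-1⟩, ⟨8,1,2,0,0⟩] 2 := by decide
-- `{}:]`   the kind is still checked
theorem d_links_extra_wrong_kind : Gives .default (ascii "{}:]") (-2) [⟨1,0,2,0,0⟩] 1 := by decide
theorem s_links_extra_wrong_kind : Gives .strictLinks (ascii "{}:]") (-2) [⟨1,0,2,0,-1⟩] 1 := by decide

/-! ### K. COUNTING MODE (tokens == NULL) NEVER LOOKS AT BRACKETS

With `tokens == NULL` jsmn only counts: `}` and `]` do nothing, and nothing is checked at the end. It accepts what the token mode rejects,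
so the count it returns is not always the number of tokens a second call will need or produce. -/

-- `]`
theorem d_close_only : Gives .default (ascii "]") (-2) [] 0 := by decide
theorem s_close_only : Gives .strictLinks (ascii "]") (-2) [] 0 := by decide
-- `}`
theorem d_close_brace_only : Gives .default (ascii "}") (-2) [] 0 := by decide
theorem s_close_brace_only : Gives .strictLinks (ascii "}") (-2) [] 0 := by decide
-- `[}`
theorem d_mismatch : Gives .default (ascii "[}") (-2) [⟨2,0,-1,0,0⟩] 1 := by decide
theorem s_mismatch : Gives .strictLinks (ascii "[}") (-2) [⟨2,0,-1,0,-1⟩] 1 := by decide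
-- `{"a":1]`
theorem d_mismatch2 : Gives .default (ascii r#"{"a":1]"#) (-2) [⟨1,0,-1,1,0⟩, ⟨4,2,3,1,0⟩, ⟨8,5,6,0,0⟩] 3 := by decide
theorem s_mismatch2 : Gives .strictLinks (ascii r#"{"a":1]"#) (-2) [⟨1,0,-1,1,-1⟩, ⟨4,2,3,1,0⟩, ⟨8,5,6,0,1⟩] 3 := by decide
-- `[]]`
theorem d_extra_close : Gives .default (ascii "[]]") (-2) [⟨2,0,2,0,0⟩] 1 := by decide
theorem s_extra_close : Gives .strictLinks (ascii "[]]") (-2) [⟨2,0,2,0,-1⟩] 1 := by decide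
-- `[`
theorem d_open_arr : Gives .default (ascii "[") (-3) [⟨2,0,-1,0,0⟩] 1 := by decide
theorem s_open_arr : Gives .strictLinks (ascii "[") (-3) [⟨2,0,-1,0,-1⟩] 1 := by decide
-- `{`
theorem d_open_obj : Gives .default (ascii "{") (-3) [⟨1,0,-1,0,0⟩] 1 := by decide
theorem s_open_obj : Gives .strictLinks (ascii "{") (-3) [⟨1,0,-1,0,-1⟩] 1 := by decide
-- `{"a":[1,2`   default: the primitive `2` ends at the end of the text
theorem d_open_nested : Gives .default (ascii r#"{"a":[1,2"#) (-3) [⟨1,0,-1,1,0⟩, ⟨4,2,3,1,0⟩, ⟨2,5,-1,2,0⟩, ⟨8,6,7,0,0⟩, ⟨8,8,9,0,0⟩] 5 := by decide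
theorem s_open_nested : Gives .strictLinks (ascii r#"{"a":[1,2"#) (-3) [⟨1,0,-1,1,-1⟩, ⟨4,2,3,1,0⟩, ⟨2,5,-1,1,1⟩, ⟨8,6,7,0,2⟩] (-3) := by decide
-- `][`
theorem d_close_open : Gives .default (ascii "][") (-2) [] 1 := by decide
theorem s_close_open : Gives .strictLinks (ascii "][") (-2) [] 1 := by decide

/-! ### L. FOR CONTRAST: WHAT A PRIMITIVE MUST NOT CONTAIN

The only check inside a primitive: a byte below 20H or above 7EH is JSMN_ERROR_INVAL (-2), in both modes. -/

-- `<C3><A9>`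
theorem d_high_in_prim : Gives .default ([0xc3, 0xa9]) (-2) [] (-2) := by decide
theorem s_high_in_prim : Gives .strictLinks ([0xc3, 0xa9]) (-2) [] (-2) := by decide
-- `[a<FF>b]`
theorem d_high_in_prim2 : Gives .default ([0x5b, 0x61, 0xff, 0x62, 0x5d]) (-2) [⟨2,0,-1,0,0⟩] (-2) := by decide
theorem s_high_in_prim2 : Gives .strictLinks ([0x5b, 0x61, 0xff, 0x62, 0x5d]) (-2) [⟨2,0,-1,0,-1⟩] (-2) := by decide
-- `<01>`
theorem d_ctrl_prim : Gives .default (ascii "\x01") (-2) [] (-2) := by decide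
theorem s_ctrl_prim : Gives .strictLinks (ascii "\x01") (-2) [] (-2) := by decide
-- `a<7F>b`
theorem d_del_prim : Gives .default (ascii "a\x7fb") (-2) [] (-2) := by decide
theorem s_del_prim : Gives .strictLinks (ascii "a\x7fb") (-2) [] (-2) := by decide

/-
  THE TABLE AS ONE LIST   (106 inputs, 212 theorems).  kind | input | default build: result, tokens type,start,end,size,parent | strict + parent links build: the same
  Results ≥ 0 are ACCEPTED (the number of tokens); -2 = JSMN_ERROR_INVAL, -3 = JSMN_ERROR_PART; "(counting: n)" where the counting mode answers differently. <XX> = the byte XXH.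

  A | txyz            | 1  8,0,4,0,0                                                        | -3
  A | nul             | 1  8,0,3,0,0                                                        | -3
  A | -               | 1  8,0,1,0,0                                                        | -3
  A | 1e              | 1  8,0,2,0,0                                                        | -3
  A | +1              | 1  8,0,2,0,0                                                        | -2
  A | 0123            | 1  8,0,4,0,0                                                        | -3
  A | .               | 1  8,0,1,0,0                                                        | -2
  A | 0x1F            | 1  8,0,4,0,0                                                        | -3
  A | NaN             | 1  8,0,3,0,0                                                        | -2
  A | -Infinity       | 1  8,0,9,0,0                                                        | -3
  A | TRUE            | 1  8,0,4,0,0                                                        | -2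
  A | [1] // c        | 4  2,0,3,1,0 8,1,2,0,0 8,4,6,0,0 8,7,8,0,0                          | -2
  A | [txyz]          | 2  2,0,6,1,0 8,1,5,0,0                                              | 2  2,0,6,1,-1 8,1,5,0,0
  A | [tru]           | 2  2,0,5,1,0 8,1,4,0,0                                              | 2  2,0,5,1,-1 8,1,4,0,0
  A | [nul]           | 2  2,0,5,1,0 8,1,4,0,0                                              | 2  2,0,5,1,-1 8,1,4,0,0
  A | [-]             | 2  2,0,3,1,0 8,1,2,0,0                                              | 2  2,0,3,1,-1 8,1,2,0,0
  A | [1e]            | 2  2,0,4,1,0 8,1,3,0,0                                              | 2  2,0,4,1,-1 8,1,3,0,0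
  A | [0123]          | 2  2,0,6,1,0 8,1,5,0,0                                              | 2  2,0,6,1,-1 8,1,5,0,0
  A | [0x1F]          | 2  2,0,6,1,0 8,1,5,0,0                                              | 2  2,0,6,1,-1 8,1,5,0,0
  A | [-Infinity]     | 2  2,0,11,1,0 8,1,10,0,0                                            | 2  2,0,11,1,-1 8,1,10,0,0
  A | [NaN]           | 2  2,0,5,1,0 8,1,4,0,0                                              | -2
  A | txyz<20>        | 1  8,0,4,0,0                                                        | 1  8,0,4,0,-1
  A | {"a":tru}       | 3  1,0,9,1,0 4,2,3,1,0 8,5,8,0,0                                    | 3  1,0,9,1,-1 4,2,3,1,0 8,5,8,0,1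
  B | 1"a"            | 1  8,0,4,0,0                                                        | -3
  B | a{              | 1  8,0,2,0,0                                                        | -2
  B | [a[b]           | 2  2,0,5,1,0 8,1,4,0,0                                              | -2
  B | [1"a"]          | 2  2,0,6,1,0 8,1,5,0,0                                              | 2  2,0,6,1,-1 8,1,5,0,0
  B | [1{]            | 2  2,0,4,1,0 8,1,3,0,0                                              | 2  2,0,4,1,-1 8,1,3,0,0
  B | [1:2]           | 3  2,0,5,1,0 8,1,2,1,0 8,3,4,0,0                                    | 2  2,0,5,1,-1 8,1,4,0,0
  B | {"a":1:2}       | 4  1,0,9,1,0 4,2,3,1,0 8,5,6,1,0 8,7,8,0,0                          | 3  1,0,9,1,-1 4,2,3,1,0 8,5,8,0,1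
  B | "a"1            | 2  4,1,2,0,0 8,3,4,0,0                                              | -3
  C | {a:1}           | 3  1,0,5,1,0 8,1,2,1,0 8,3,4,0,0                                    | -2
  C | {"a":b}         | 3  1,0,7,1,0 4,2,3,1,0 8,5,6,0,0                                    | -2
  C | {1:2}           | 3  1,0,5,1,0 8,1,2,1,0 8,3,4,0,0                                    | -2 (counting: 2)
  C | {[1]:2}         | 4  1,0,7,1,0 2,1,4,1,0 8,2,3,1,0 8,5,6,0,0                          | -2 (counting: 4)
  C | {{}:1}          | 3  1,0,6,1,0 1,1,3,1,0 8,4,5,0,0                                    | -2 (counting: 3)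
  C | {'a':1}         | 3  1,0,7,1,0 8,1,4,1,0 8,5,6,0,0                                    | -2
  C | {:1}            | 2  1,0,4,1,0 8,2,3,0,0                                              | -2 (counting: 2)
  D | [1 2]           | 3  2,0,5,2,0 8,1,2,0,0 8,3,4,0,0                                    | 3  2,0,5,2,-1 8,1,2,0,0 8,3,4,0,0
  D | {"a":1 "b":2}   | 5  1,0,13,1,0 4,2,3,2,0 8,5,6,0,0 4,8,9,1,0 8,11,12,0,0             | 5  1,0,13,1,-1 4,2,3,2,0 8,5,6,0,1 4,8,9,1,1 8,11,12,0,3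
  D | {"a":[1] "b":2} | 6  1,0,15,2,0 4,2,3,1,0 2,5,8,1,0 8,6,7,0,0 4,10,11,1,0 8,13,14,0,0 | 6  1,0,15,1,-1 4,2,3,2,0 2,5,8,1,1 8,6,7,0,2 4,10,11,1,1 8,13,14,0,4
  D | [1,2,]          | 3  2,0,6,2,0 8,1,2,0,0 8,3,4,0,0                                    | 3  2,0,6,2,-1 8,1,2,0,0 8,3,4,0,0
  D | {"a":1,}        | 3  1,0,8,1,0 4,2,3,1,0 8,5,6,0,0                                    | 3  1,0,8,1,-1 4,2,3,1,0 8,5,6,0,1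
  D | [,1]            | 2  2,0,4,1,0 8,2,3,0,0                                              | 2  2,0,4,1,-1 8,2,3,0,0
  D | [1,,2]          | 3  2,0,6,2,0 8,1,2,0,0 8,4,5,0,0                                    | 3  2,0,6,2,-1 8,1,2,0,0 8,4,5,0,0
  D | ,               | 0                                                                   | 0
  D | {"a","b"}       | 3  1,0,9,2,0 4,2,3,0,0 4,6,7,0,0                                    | 3  1,0,9,2,-1 4,2,3,0,0 4,6,7,0,0
  D | {"a":1 2}       | 4  1,0,9,1,0 4,2,3,2,0 8,5,6,0,0 8,7,8,0,0                          | -2 (counting: 4)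
  D | {"a":"b" "c"}   | 4  1,0,13,1,0 4,2,3,2,0 4,6,7,0,0 4,10,11,0,0                       | 4  1,0,13,1,-1 4,2,3,2,0 4,6,7,0,1 4,10,11,0,1
  E | :               | 0                                                                   | 0
  E | {"a" "b"}       | 3  1,0,9,2,0 4,2,3,0,0 4,6,7,0,0                                    | 3  1,0,9,2,-1 4,2,3,0,0 4,6,7,0,0
  E | {"a"}           | 2  1,0,5,1,0 4,2,3,0,0                                              | 2  1,0,5,1,-1 4,2,3,0,0
  E | {"a":}          | 2  1,0,6,1,0 4,2,3,0,0                                              | 2  1,0,6,1,-1 4,2,3,0,0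
  E | {"a"::1}        | 3  1,0,8,1,0 4,2,3,1,0 8,6,7,0,0                                    | 3  1,0,8,1,-1 4,2,3,1,0 8,6,7,0,1
  E | ["a":1]         | 3  2,0,7,1,0 4,2,3,1,0 8,5,6,0,0                                    | 3  2,0,7,1,-1 4,2,3,1,0 8,5,6,0,1
  E | [:1]            | 2  2,0,4,1,0 8,2,3,0,0                                              | 2  2,0,4,1,-1 8,2,3,0,0
  E | 1:2             | 2  8,0,1,1,0 8,2,3,0,0                                              | -3
  E | "a":"b"         | 2  4,1,2,1,0 4,5,6,0,0                                              | 2  4,1,2,1,-1 4,5,6,0,0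
  E | [1,2]:3<20>     | 4  2,0,5,2,0 8,1,2,0,0 8,3,4,1,0 8,6,7,0,0                          | 4  2,0,5,2,-1 8,1,2,0,0 8,3,4,1,0 8,6,7,0,2
  F |                 | 0                                                                   | 0
  F |   <0A>          | 0                                                                   | 0
  F | 1 2             | 2  8,0,1,0,0 8,2,3,0,0                                              | -3
  F | {}{}            | 2  1,0,2,0,0 1,2,4,0,0                                              | 2  1,0,2,0,-1 1,2,4,0,-1
  F | "a" "b"         | 2  4,1,2,0,0 4,5,6,0,0                                              | 2  4,1,2,0,-1 4,5,6,0,-1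
  F | [] 1<20>        | 2  2,0,2,0,0 8,3,4,0,0                                              | 2  2,0,2,0,-1 8,3,4,0,-1
  G | <00>[1]         | 0                                                                   | 0
  G | [1]<00>]]]      | 2  2,0,3,1,0 8,1,2,0,0                                              | 2  2,0,3,1,-1 8,1,2,0,0
  G | [1,<00>2]       | -3 (counting: 2)                                                    | -3 (counting: 2)
  H | 42              | 1  8,0,2,0,0                                                        | -3
  H | true            | 1  8,0,4,0,0                                                        | -3
  H | null            | 1  8,0,4,0,0                                                        | -3
  H | -1.5E-10        | 1  8,0,8,0,0                                                        | -3
  H | 42<20>          | 1  8,0,2,0,0                                                        | 1  8,0,2,0,-1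
  H | true<0A>        | 1  8,0,4,0,0                                                        | 1  8,0,4,0,-1
  I | "a<01>b"        | 1  4,1,4,0,0                                                        | 1  4,1,4,0,-1
  I | "a<09>b"        | 1  4,1,4,0,0                                                        | 1  4,1,4,0,-1
  I | "a<0A>b"        | 1  4,1,4,0,0                                                        | 1  4,1,4,0,-1
  I | "a<7F>b"        | 1  4,1,4,0,0                                                        | 1  4,1,4,0,-1
  I | "<FF><FE>"      | 1  4,1,3,0,0                                                        | 1  4,1,3,0,-1
  I | "\ud800"        | 1  4,1,7,0,0                                                        | 1  4,1,7,0,-1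
  I | "\x"            | -2                                                                  | -2
  I | "\u12G4"        | -2                                                                  | -2
  I | "\u12"          | -2                                                                  | -2
  I | "\u00           | -3                                                                  | -3
  I | "\u             | -3                                                                  | -3
  I | "abc\           | -3                                                                  | -3
  I | "a\<00>"        | -2                                                                  | -2
  I | "a<00>b"        | -3                                                                  | -3
  J | {}:}            | -2 (counting: 1)                                                    | 1  1,0,2,0,-1
  J | []:]            | -2 (counting: 1)                                                    | 1  2,0,2,0,-1
  J | {"a":1}:}       | -2 (counting: 3)                                                    | 3  1,0,7,1,-1 4,2,3,1,0 8,5,6,0,1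
  J | [1]:]:]         | -2 (counting: 2)                                                    | 2  2,0,3,1,-1 8,1,2,0,0
  J | {}:]            | -2 (counting: 1)                                                    | -2 (counting: 1)
  K | ]               | -2 (counting: 0)                                                    | -2 (counting: 0)
  K | }               | -2 (counting: 0)                                                    | -2 (counting: 0)
  K | [}              | -2 (counting: 1)                                                    | -2 (counting: 1)
  K | {"a":1]         | -2 (counting: 3)                                                    | -2 (counting: 3)
  K | []]             | -2 (counting: 1)                                                    | -2 (counting: 1)
  K | [               | -3 (counting: 1)                                                    | -3 (counting: 1)
  K | {               | -3 (counting: 1)                                                    | -3 (counting: 1)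
  K | {"a":[1,2       | -3 (counting: 5)                                                    | -3
  K | ][              | -2 (counting: 1)                                                    | -2 (counting: 1)
  L | <C3><A9>        | -2                                                                  | -2
  L | [a<FF>b]        | -2                                                                  | -2
  L | <01>            | -2                                                                  | -2
  L | a<7F>b          | -2                                                                  | -2

  KINDS
  A  numbers and literals are not checked
  B  a primitive swallows quotes and opening brackets (and, in strict mode, colons)
  C  keys need not be strings, values need not be json values (default configuration)
  D  commas are not required and not checked
  E  colons are not required and not checked
  F  any number of values at top level, also none
  G  a nul byte ends the text
  H  strict mode rejects valid json: a primitive at the end of the text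
  I  strings: control characters and ill-formed utf-8 are accepted
  J  with parent links: an unmatched closing bracket is accepted after a colon
  K  counting mode (tokens == null) never looks at brackets
  L  for contrast: what a primitive must not contain
-/

end Jsmn.AcceptTable
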